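-- pv_equiv track=rewrite | github.com/autralabs/agentshield | src/pyagentshield/cleaning/finetuned.py | _extract_cleaned_output
-- ===== SOURCE A (Python) =====
-- def _extract_cleaned_output(generated: str) -> str:
--     """Extract the cleaned text from model output."""
--     # Look for the output marker
--     marker = "### Cleaned Output:"
--     if marker in generated:
--         cleaned = generated.split(marker)[-1].strip()
--     else:
--         # Fallback: return everything after the input
--         cleaned = generated
--
--     # Remove any trailing markers or formatting
--     stop_markers = [
--         "###",
--         "<|endoftext|>",
--         "<|end|>",
--         "### Input:",
--         "### Task:",
--     ]
--     for marker in stop_markers: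
--         if marker in cleaned:
--             cleaned = cleaned.split(marker)[0]
--
--     return cleaned.strip()
-- ===== SOURCE B (Python) =====
-- def _extract_cleaned_output(generated: str) -> str:
--     """Extract the cleaned text from model output."""
--     marker = "### Cleaned Output:"
--     if marker in generated:
--         cleaned = generated.split(marker)[-1].strip()
--     else:
--         # Fallback: return everything after the input
--         cleaned = generated
--
--     # Cut once at the earliest stop marker, instead of re-splitting repeatedly
--     stop_markers = [
--         "###",
--         "<|endoftext|>",
--         "<|end|>",
--         "### Input:",
--         "### Task:",
--     ]
--     positions = [p for p in (cleaned.find(m) for m in stop_markers) if p >= 0]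
--     if positions:
--         cleaned = cleaned[:min(positions)]
--
--     return cleaned.strip()
-- ===== Notes on version B (the rewrite author's own statement) =====
-- stated objective: alternative
-- what changed: A's sequential loop that repeatedly re-splits the shrinking string at each stop marker is replaced by a single cut: collect the non-negative str.find positions of all five stop markers in the cleaned text and slice once at their minimum (the earliest marker), leaving the text unchanged when no marker occurs.
import Mathlib
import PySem

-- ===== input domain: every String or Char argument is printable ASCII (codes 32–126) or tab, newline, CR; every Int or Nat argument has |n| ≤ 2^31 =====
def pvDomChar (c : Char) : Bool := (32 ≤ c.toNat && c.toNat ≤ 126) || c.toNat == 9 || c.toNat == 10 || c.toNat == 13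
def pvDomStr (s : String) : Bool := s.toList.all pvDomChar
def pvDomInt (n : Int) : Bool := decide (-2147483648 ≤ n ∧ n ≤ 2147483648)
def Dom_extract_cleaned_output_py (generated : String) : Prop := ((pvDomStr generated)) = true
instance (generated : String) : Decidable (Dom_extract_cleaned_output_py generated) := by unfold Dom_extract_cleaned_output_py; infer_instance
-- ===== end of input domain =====

-- B replaces A's sequential re-split loop over the stop markers by one cut at the
-- earliest marker position (min of the non-negative find results); same return value.

-- ===== PORT A =====
def extract_cleaned_output_py (generated : String) : String :=
  let marker : String := "### Cleaned Output:"
  let cleaned : String :=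
    if PySem.Str.isIn marker generated then
      -- generated.split(marker)[-1].strip(); split with a nonempty sep never returns none or []
      PySem.Str.strip ((PySem.List.pyGet? ((PySem.Str.split? generated marker).getD []) (-1)).getD "")
    else
      generated
  let stop_markers : List String := ["###", "<|endoftext|>", "<|end|>", "### Input:", "### Task:"]
  let cleaned :=
    stop_markers.foldl (fun c m =>
      if PySem.Str.isIn m c then
        (PySem.List.pyGet? ((PySem.Str.split? c m).getD []) 0).getD ""
      else c) cleaned
  PySem.Str.strip cleaned

-- ===== PORT B =====
def extract_cleaned_output_py_alt (generated : String) : String :=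
  let marker : String := "### Cleaned Output:"
  let cleaned : String :=
    if PySem.Str.isIn marker generated then
      PySem.Str.strip ((PySem.List.pyGet? ((PySem.Str.split? generated marker).getD []) (-1)).getD "")
    else
      generated
  let stop_markers : List String := ["###", "<|endoftext|>", "<|end|>", "### Input:", "### Task:"]
  let positions : List Int :=
    (stop_markers.map (fun m => PySem.Str.find cleaned m)).filter (fun p => decide (0 ≤ p))
  let cleaned :=
    match PySem.List.min? positions (fun p => p) with
    | some p => PySem.Str.slice cleaned none (some p)
    | none => cleaned
  PySem.Str.strip cleaned

-- ===== PRECONDITION & SPEC =====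
def Spec_extract_cleaned_output_py (generated : String) (out : String) : Prop := out = extract_cleaned_output_py_alt generated
instance (generated : String) (out : String) : Decidable (Spec_extract_cleaned_output_py generated out) := by unfold Spec_extract_cleaned_output_py; infer_instance

-- ===== CLAIM (what is proved, stated in full; the proofs are below) =====
def Claim_equal_extract_cleaned_output_py : Prop := ∀ (generated : String), Dom_extract_cleaned_output_py generated → Spec_extract_cleaned_output_py generated (extract_cleaned_output_py generated)

-- ===== LEMMAS AND PROOFS =====

-- the cut length Python's `s.split(m)[0]` keeps: first occurrence of m, else the whole string
def pvCutLen (m s : List Char) : Nat :=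
  if 0 ≤ PySem.Chars.find s m then (PySem.Chars.find s m).toNat else s.length

theorem pvCut_le (m s : List Char) : pvCutLen m s ≤ s.length := by
  unfold pvCutLen
  split
  · have h := PySem.Chars.find_le_length s m
    omega
  · exact le_refl _

theorem pvCut_min (m s : List Char) (i : ℕ) (hocc : m <+: s.drop i) :
    pvCutLen m s ≤ i := by
  unfold pvCutLen
  split
  · rename_i h
    have hs := (PySem.Chars.find_spec h).2
    by_contra hc
    exact hs i (by omega) hocc
  · rename_i h
    have hinf : m <:+: s := by
      rw [← PySem.Chars.isIn_iff_infix, ← PySem.Chars.exists_prefix_drop_iff_isIn]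
      exact ⟨i, hocc⟩
    rw [← PySem.Chars.find_nonneg_iff] at hinf
    exact absurd hinf h

theorem pvCut_occ {m s : List Char} (h : m <:+: s) : m <+: s.drop (pvCutLen m s) := by
  have h0 : 0 ≤ PySem.Chars.find s m := (PySem.Chars.find_nonneg_iff s m).mpr h
  unfold pvCutLen
  rw [if_pos h0]
  exact (PySem.Chars.find_spec h0).1

theorem pvCut_len_of_not {m s : List Char} (h : ¬ m <:+: s) : pvCutLen m s = s.length := by
  unfold pvCutLen
  rw [if_neg]
  intro h0
  exact h ((PySem.Chars.find_nonneg_iff s m).mp h0)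

theorem pvCut_lt_of_infix {m s : List Char} (hm : m ≠ []) (h : m <:+: s) :
    pvCutLen m s < s.length := by
  have hocc := pvCut_occ h
  have hlen : m.length ≤ (s.drop (pvCutLen m s)).length := hocc.length_le
  have hpos : 0 < m.length := List.length_pos_of_ne_nil hm
  simp [List.length_drop] at hlen
  omega

theorem pvCut_found_of_lt {m s : List Char} (h : pvCutLen m s < s.length) :
    m <+: s.drop (pvCutLen m s) := by
  by_cases hin : m <:+: s
  · exact pvCut_occ hin
  · rw [pvCut_len_of_not hin] at h
    omega

theorem pvCut_eq {m s : List Char} {k : ℕ} (hocc : m <+: s.drop k)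
    (hmin : ∀ i < k, ¬ m <+: s.drop i) : pvCutLen m s = k := by
  have hinf : m <:+: s := by
    rw [← PySem.Chars.isIn_iff_infix, ← PySem.Chars.exists_prefix_drop_iff_isIn]
    exact ⟨k, hocc⟩
  have h1 : pvCutLen m s ≤ k := pvCut_min m s k hocc
  by_contra hc
  exact hmin (pvCutLen m s) (by omega) (pvCut_occ hinf)

theorem pvOcc_take_iff {m s : List Char} (hm : m ≠ []) (p i : ℕ) :
    m <+: (s.take p).drop i ↔ m <+: s.drop i ∧ i + m.length ≤ p := by
  have hpos : 0 < m.length := List.length_pos_of_ne_nil hm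
  rw [List.drop_take, List.prefix_take_iff]
  constructor
  · rintro ⟨h1, h2⟩
    exact ⟨h1, by omega⟩
  · rintro ⟨h1, h2⟩
    exact ⟨h1, by omega⟩

theorem pvOcc_getElem? {m s : List Char} {k : ℕ} (h : m <+: s.drop k) {j : ℕ}
    (hj : j < m.length) : s[k + j]? = m[j]? := by
  obtain ⟨t, ht⟩ := h
  rw [← List.getElem?_drop, ← ht, List.getElem?_append_left hj]

theorem pvStraddleChar {m cs : List Char} {i p : ℕ} (hocc : m <+: cs.drop i)
    (hi : i < p) (hlt : p < i + m.length) : cs[p]? = m[p - i]? := by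
  have h := pvOcc_getElem? hocc (j := p - i) (by omega)
  rwa [show i + (p - i) = p by omega] at h

-- find on a prefix cut at p, when no occurrence straddles position p
theorem pvCutLen_take {m s : List Char} (hm : m ≠ []) {p : ℕ} (hp : p ≤ s.length)
    (hstr : ∀ i, m <+: s.drop i → i < p → i + m.length ≤ p) :
    pvCutLen m (s.take p) = min p (pvCutLen m s) := by
  have hpos : 0 < m.length := List.length_pos_of_ne_nil hm
  by_cases h : pvCutLen m s < p
  · -- the first occurrence survives the cut
    have hinf : m <:+: s := by
      by_contra hni
      rw [pvCut_len_of_not hni] at h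
      omega
    have hocc := pvCut_occ hinf
    have hfit : pvCutLen m s + m.length ≤ p := hstr _ hocc h
    have hEq : pvCutLen m (s.take p) = pvCutLen m s := by
      apply pvCut_eq
      · exact (pvOcc_take_iff hm p _).mpr ⟨hocc, hfit⟩
      · intro i hi hocc'
        have := pvCut_min m s i ((pvOcc_take_iff hm p i).mp hocc').1
        omega
    omega
  · -- no occurrence inside the cut
    have hno : ¬ m <:+: (s.take p) := by
      intro hinf
      rw [← PySem.Chars.isIn_iff_infix, ← PySem.Chars.exists_prefix_drop_iff_isIn] at hinf
      obtain ⟨i, hocc⟩ := hinf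
      obtain ⟨h1, h2⟩ := (pvOcc_take_iff hm p i).mp hocc
      have := pvCut_min m s i h1
      omega
    have := pvCut_len_of_not hno
    rw [List.length_take] at this
    omega

-- ---- the head of PySem.Chars.splitOn is the prefix before the first occurrence ----

theorem pvGo_append (sep : List Char) (fuel : ℕ) :
    ∀ (l cur : List Char) (acc : List (List Char)),
      PySem.Chars.splitOn.go sep fuel l cur acc =
        acc.reverse ++ PySem.Chars.splitOn.go sep fuel l cur [] := by
  induction fuel with
  | zero =>
    intro l cur acc
    rw [PySem.Chars.splitOn.go, PySem.Chars.splitOn.go]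
    simp
  | succ fuel ih =>
    intro l cur acc
    cases l with
    | nil =>
      rw [PySem.Chars.splitOn.go, PySem.Chars.splitOn.go]
      · simp
      all_goals omega
    | cons c rest =>
      rw [PySem.Chars.splitOn.go, PySem.Chars.splitOn.go]
      by_cases hp : sep.isPrefixOf (c :: rest) = true
      · simp only [hp, if_true]
        rw [ih _ _ (cur.reverse :: acc), ih _ _ (cur.reverse :: [])]
        simp
      · simp only [hp, if_false, Bool.false_eq_true]
        rw [ih _ _ acc]

theorem pvGo_headD_first (sep : List Char) (hm : sep ≠ []) (fuel : ℕ) :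
    ∀ (l cur : List Char) (k : ℕ), l.length < fuel →
      sep <+: l.drop k → (∀ i < k, ¬ sep <+: l.drop i) →
      (PySem.Chars.splitOn.go sep fuel l cur []).headD [] = cur.reverse ++ l.take k := by
  induction fuel with
  | zero => intro l cur k h; omega
  | succ fuel ih =>
    intro l cur k hlen hocc hmin
    cases l with
    | nil =>
      simp at hocc
      exact absurd hocc hm
    | cons c rest =>
      cases k with
      | zero =>
        have hp : sep.isPrefixOf (c :: rest) = true := by
          rw [List.isPrefixOf_iff_prefix]
          simpa using hocc
        rw [PySem.Chars.splitOn.go]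
        simp only [hp, if_true]
        rw [pvGo_append]
        simp
      | succ k =>
        have hp : sep.isPrefixOf (c :: rest) = false := by
          rw [Bool.eq_false_iff]
          intro hc
          rw [List.isPrefixOf_iff_prefix] at hc
          exact hmin 0 (Nat.succ_pos k) (by simpa using hc)
        rw [PySem.Chars.splitOn.go]
        simp only [hp, if_false, Bool.false_eq_true]
        have := ih rest (c :: cur) k (by simp at hlen; omega)
          (by simpa using hocc)
          (by intro i hi; have := hmin (i + 1) (by omega); simpa using this)
        rw [this]
        simp

theorem pvGo_headD_none (sep : List Char) (fuel : ℕ) :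
    ∀ (l cur : List Char), l.length < fuel →
      (∀ i, ¬ sep <+: l.drop i) →
      (PySem.Chars.splitOn.go sep fuel l cur []).headD [] = cur.reverse ++ l := by
  induction fuel with
  | zero => intro l cur h; omega
  | succ fuel ih =>
    intro l cur hlen hno
    cases l with
    | nil =>
      rw [PySem.Chars.splitOn.go]
      · simp
      all_goals omega
    | cons c rest =>
      have hp : sep.isPrefixOf (c :: rest) = false := by
        rw [Bool.eq_false_iff]
        intro hc
        rw [List.isPrefixOf_iff_prefix] at hc
        exact hno 0 (by simpa using hc)
      rw [PySem.Chars.splitOn.go]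
      simp only [hp, if_false, Bool.false_eq_true]
      have := ih rest (c :: cur) (by simp at hlen; omega)
        (by intro i; have := hno (i + 1); simpa using this)
      rw [this]
      simp

theorem pvSplitOn_headD {sep : List Char} (hm : sep ≠ []) (s : List Char) :
    (PySem.Chars.splitOn s sep).headD [] = s.take (pvCutLen sep s) := by
  rw [PySem.Chars.splitOn]
  by_cases hin : sep <:+: s
  · have := pvGo_headD_first sep hm (s.length + 1) s [] (pvCutLen sep s)
      (by omega) (pvCut_occ hin)
      (by intro i hi hocc; have := pvCut_min sep s i hocc; omega)
    simpa using this
  · have h1 := pvCut_len_of_not hin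
    have := pvGo_headD_none sep (s.length + 1) s [] (by omega)
      (by
        intro i hocc
        apply hin
        rw [← PySem.Chars.isIn_iff_infix, ← PySem.Chars.exists_prefix_drop_iff_isIn]
        exact ⟨i, hocc⟩)
    rw [this, h1]
    simp

theorem pvGet0_headD (l : List String) : (PySem.List.pyGet? l 0).getD "" = l.headD "" := by
  cases l <;> simp [PySem.List.pyGet?, PySem.List.pyIdx?]

-- one iteration of A's loop, on the character level
theorem pvStepA_toList (c m : String) (hm : m.toList ≠ []) :
    (if PySem.Str.isIn m c then
        (PySem.List.pyGet? ((PySem.Str.split? c m).getD []) 0).getD ""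
      else c).toList
      = c.toList.take (pvCutLen m.toList c.toList) := by
  by_cases hin : PySem.Str.isIn m c = true
  · rw [if_pos hin]
    have hne : m.toList.isEmpty = false := by
      cases h : m.toList with
      | nil => exact absurd h hm
      | cons a t => simp
    rw [pvGet0_headD]
    simp only [PySem.Str.split?, PySem.Chars.split?, hne, Bool.false_eq_true, if_false,
      Option.map_some, Option.getD_some]
    rw [← pvSplitOn_headD hm]
    cases h : PySem.Chars.splitOn c.toList m.toList with
    | nil => simp
    | cons x t => simp [String.toList_ofList]
  · rw [if_neg hin]
    have hni : ¬ m.toList <:+: c.toList := by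
      rw [← PySem.Chars.isIn_iff_infix]
      simpa [PySem.Str.isIn] using hin
    rw [pvCut_len_of_not hni]
    simp

-- straddle impossibility: no occurrence of "<|endoftext|>" crosses the first "###"
theorem pvStr2 (cs : List Char) :
    ∀ i, "<|endoftext|>".toList <+: cs.drop i → i < pvCutLen "###".toList cs →
      i + "<|endoftext|>".toList.length ≤ pvCutLen "###".toList cs := by
  intro i hocc hi
  by_contra hlt
  set n1 := pvCutLen "###".toList cs with hn1
  have hlen13 : ("<|endoftext|>".toList).length = 13 := by decide
  have hfit : i + 13 ≤ cs.length := by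
    have := hocc.length_le
    simp [List.length_drop] at this
    omega
  have hn1lt : n1 < cs.length := by
    have := pvCut_le "###".toList cs
    rw [hlen13] at hlt
    omega
  have hocc1 := pvCut_found_of_lt (m := "###".toList) hn1lt
  have hc1 : cs[n1]? = ("###".toList)[0]? := by
    have := pvOcc_getElem? hocc1 (j := 0) (by decide)
    simpa using this
  have hc2 : cs[n1]? = ("<|endoftext|>".toList)[n1 - i]? := by
    apply pvStraddleChar hocc hi
    omega
  have hj1 : 1 ≤ n1 - i := by omega
  have hj2 : n1 - i ≤ 12 := by rw [hlen13] at hlt; omega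
  have hcontra : ("<|endoftext|>".toList)[n1 - i]? = ("###".toList)[0]? := by
    rw [← hc2, hc1]
  have hne : ("<|endoftext|>".toList)[n1 - i]? ≠ ("###".toList)[0]? := by
    set j := n1 - i with hjj
    clear_value j
    interval_cases j <;> decide
  exact hne hcontra

-- no occurrence of "<|end|>" crosses the earlier of the first "###" / "<|endoftext|>"
theorem pvStr3 (cs : List Char) :
    ∀ i, "<|end|>".toList <+: cs.drop i →
      i < min (pvCutLen "###".toList cs) (pvCutLen "<|endoftext|>".toList cs) →
      i + "<|end|>".toList.length ≤
        min (pvCutLen "###".toList cs) (pvCutLen "<|endoftext|>".toList cs) := by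
  intro i hocc hi
  by_contra hlt
  set n1 := pvCutLen "###".toList cs with hn1
  set q2 := pvCutLen "<|endoftext|>".toList cs with hq2
  set p := min n1 q2 with hp
  have hlen7 : ("<|end|>".toList).length = 7 := by decide
  have hfit : i + 7 ≤ cs.length := by
    have := hocc.length_le
    simp [List.length_drop] at this
    omega
  have hplt : p < cs.length := by
    have h1 := pvCut_le "###".toList cs
    have h2 := pvCut_le "<|endoftext|>".toList cs
    rw [hlen7] at hlt
    omega
  have hcp : cs[p]? = some '#' ∨ cs[p]? = some '<' := by
    by_cases hc : n1 ≤ q2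
    · left
      have hpn : p = n1 := by omega
      have hocc1 := pvCut_found_of_lt (m := "###".toList) (s := cs) (by omega)
      have := pvOcc_getElem? hocc1 (j := 0) (by decide)
      rw [hpn]
      simpa using this
    · right
      have hpn : p = q2 := by omega
      have hocc2 := pvCut_found_of_lt (m := "<|endoftext|>".toList) (s := cs) (by omega)
      have := pvOcc_getElem? hocc2 (j := 0) (by decide)
      rw [hpn]
      simpa using this
  have hc2 : cs[p]? = ("<|end|>".toList)[p - i]? := by
    apply pvStraddleChar hocc (by omega)
    omega
  have hj1 : 1 ≤ p - i := by omega
  have hj2 : p - i ≤ 6 := by rw [hlen7] at hlt; omega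
  have hne : ("<|end|>".toList)[p - i]? ≠ some '#' ∧ ("<|end|>".toList)[p - i]? ≠ some '<' := by
    set j := p - i with hjj
    clear_value j
    interval_cases j <;> exact ⟨by decide, by decide⟩
  rcases hcp with h | h <;> rw [hc2] at h
  · exact hne.1 h
  · exact hne.2 h

-- markers that contain "###" can never occur strictly before the first "###"
theorem pvStrSub {m : List Char} (hpref : "###".toList <+: m) (cs : List Char) {p : ℕ}
    (hp : p ≤ pvCutLen "###".toList cs) :
    ∀ i, m <+: cs.drop i → i < p → i + m.length ≤ p := by
  intro i hocc hi
  have := pvCut_min "###".toList cs i (hpref.trans hocc)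
  omega

theorem pvCut_ge_of_pref {m : List Char} (hpref : "###".toList <+: m) (cs : List Char) :
    pvCutLen "###".toList cs ≤ pvCutLen m cs := by
  by_cases hin : m <:+: cs
  · exact pvCut_min "###".toList cs _ (hpref.trans (pvCut_occ hin))
  · rw [pvCut_len_of_not hin]
    exact pvCut_le _ _

theorem pvCut_of_found {cs m : List Char} (h : 0 ≤ PySem.Chars.find cs m) :
    pvCutLen m cs = (PySem.Chars.find cs m).toNat := by
  unfold pvCutLen; rw [if_pos h]

theorem pvCut_of_neg {cs m : List Char} (h : ¬ 0 ≤ PySem.Chars.find cs m) :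
    pvCutLen m cs = cs.length := by
  unfold pvCutLen; rw [if_neg h]

theorem pvFound_of_lt {cs m : List Char} (h : pvCutLen m cs < cs.length) :
    0 ≤ PySem.Chars.find cs m := by
  by_contra hc
  rw [pvCut_of_neg hc] at h
  omega

theorem pvFind_sub_nonneg {cs m : List Char} (hpref : "###".toList <+: m)
    (h : 0 ≤ PySem.Chars.find cs m) : 0 ≤ PySem.Chars.find cs "###".toList := by
  have hocc := (PySem.Chars.find_spec h).1
  rw [PySem.Chars.find_nonneg_iff, ← PySem.Chars.isIn_iff_infix,
    ← PySem.Chars.exists_prefix_drop_iff_isIn]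
  exact ⟨_, hpref.trans hocc⟩

-- A's loop body as a named function (definitionally equal to the port's lambda)
def pvStep (c m : String) : String :=
  if PySem.Str.isIn m c then
    (PySem.List.pyGet? ((PySem.Str.split? c m).getD []) 0).getD ""
  else c

theorem pvStep_toList (c m : String) (hm : m.toList ≠ []) :
    (pvStep c m).toList = c.toList.take (pvCutLen m.toList c.toList) :=
  pvStepA_toList c m hm

-- the heart of the equivalence: A's sequential re-split loop equals B's single cut
set_option maxHeartbeats 2000000 in
theorem pvMain (c : String) :
    (["###", "<|endoftext|>", "<|end|>", "### Input:", "### Task:"].foldl (fun c m =>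
        if PySem.Str.isIn m c then
          (PySem.List.pyGet? ((PySem.Str.split? c m).getD []) 0).getD ""
        else c) c)
    = (match PySem.List.min?
          (((["###", "<|endoftext|>", "<|end|>", "### Input:", "### Task:"] : List String).map
            (fun m => PySem.Str.find c m)).filter (fun p => decide (0 ≤ p))) (fun p => p) with
       | some p => PySem.Str.slice c none (some p)
       | none => c) := by
  have hstep : (fun (c m : String) =>
      if PySem.Str.isIn m c then
        (PySem.List.pyGet? ((PySem.Str.split? c m).getD []) 0).getD ""
      else c) = pvStep := rfl
  rw [hstep]
  simp only [List.foldl_cons, List.foldl_nil]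
  set cs := c.toList with hcs
  set n1 := pvCutLen "###".toList cs with hn1
  set q2 := pvCutLen "<|endoftext|>".toList cs with hq2
  set q3 := pvCutLen "<|end|>".toList cs with hq3
  have hle1 := pvCut_le "###".toList cs
  have hle2 := pvCut_le "<|endoftext|>".toList cs
  have hle3 := pvCut_le "<|end|>".toList cs
  -- chain of toList values through A's five iterations
  have h1 : (pvStep c "###").toList = cs.take n1 := by
    rw [pvStep_toList _ _ (by decide)]
  have h2 : (pvStep (pvStep c "###") "<|endoftext|>").toList = cs.take (min n1 q2) := by
    rw [pvStep_toList _ _ (by decide), h1,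
      pvCutLen_take (by decide) (by omega) (pvStr2 cs), List.take_take]
    congr 1
    omega
  have h3 : (pvStep (pvStep (pvStep c "###") "<|endoftext|>") "<|end|>").toList
      = cs.take (min (min n1 q2) q3) := by
    rw [pvStep_toList _ _ (by decide), h2,
      pvCutLen_take (by decide) (by omega) (pvStr3 cs), List.take_take]
    congr 1
    omega
  have h4 : (pvStep (pvStep (pvStep (pvStep c "###") "<|endoftext|>") "<|end|>")
        "### Input:").toList = cs.take (min (min n1 q2) q3) := by
    rw [pvStep_toList _ _ (by decide), h3,
      pvCutLen_take (by decide) (by omega)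
        (pvStrSub (m := "### Input:".toList) (by decide) cs (by omega)), List.take_take]
    have hge := pvCut_ge_of_pref (m := "### Input:".toList) (by decide) cs
    refine congrArg (fun k => List.take k cs) ?_
    omega
  have h5 : (pvStep (pvStep (pvStep (pvStep (pvStep c "###") "<|endoftext|>") "<|end|>")
        "### Input:") "### Task:").toList = cs.take (min (min n1 q2) q3) := by
    rw [pvStep_toList _ _ (by decide), h4,
      pvCutLen_take (by decide) (by omega)
        (pvStrSub (m := "### Task:".toList) (by decide) cs (by omega)), List.take_take]
    have hge := pvCut_ge_of_pref (m := "### Task:".toList) (by decide) cs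
    refine congrArg (fun k => List.take k cs) ?_
    omega
  set n3 := min (min n1 q2) q3 with hn3
  -- B side
  set f1 := PySem.Chars.find cs "###".toList with hf1
  set f2 := PySem.Chars.find cs "<|endoftext|>".toList with hf2
  set f3 := PySem.Chars.find cs "<|end|>".toList with hf3
  set f4 := PySem.Chars.find cs "### Input:".toList with hf4
  set f5 := PySem.Chars.find cs "### Task:".toList with hf5
  apply String.toList_inj.mp
  by_cases hany : 0 ≤ f1 ∨ 0 ≤ f2 ∨ 0 ≤ f3
  · -- some stop marker occurs: B cuts at the minimum position, which is n3
    have hlt : n3 < cs.length := by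
      rcases hany with h | h | h
      · have := pvCut_lt_of_infix (m := "###".toList) (by decide)
          ((PySem.Chars.find_nonneg_iff cs _).mp h)
        omega
      · have := pvCut_lt_of_infix (m := "<|endoftext|>".toList) (by decide)
          ((PySem.Chars.find_nonneg_iff cs _).mp h)
        omega
      · have := pvCut_lt_of_infix (m := "<|end|>".toList) (by decide)
          ((PySem.Chars.find_nonneg_iff cs _).mp h)
        omega
    -- a witness marker whose find is exactly n3
    have hwit : ∃ mk ∈ (["###", "<|endoftext|>", "<|end|>", "### Input:", "### Task:"] : List String),
        0 ≤ PySem.Chars.find cs mk.toList ∧ (PySem.Chars.find cs mk.toList).toNat = n3 := by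
      have hk : n3 = n1 ∨ n3 = q2 ∨ n3 = q3 := by omega
      rcases hk with hk | hk | hk
      · have h0 : 0 ≤ PySem.Chars.find cs "###".toList := pvFound_of_lt (by omega)
        have hpc := pvCut_of_found h0
        exact ⟨"###", by simp, h0, by omega⟩
      · have h0 : 0 ≤ PySem.Chars.find cs "<|endoftext|>".toList := pvFound_of_lt (by omega)
        have hpc := pvCut_of_found h0
        exact ⟨"<|endoftext|>", by simp, h0, by omega⟩
      · have h0 : 0 ≤ PySem.Chars.find cs "<|end|>".toList := pvFound_of_lt (by omega)
        have hpc := pvCut_of_found h0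
        exact ⟨"<|end|>", by simp, h0, by omega⟩
    obtain ⟨mk, hmkL, hmk0, hmkv⟩ := hwit
    have hmkpos : PySem.Str.find c mk ∈
        (((["###", "<|endoftext|>", "<|end|>", "### Input:", "### Task:"] : List String).map
          (fun m => PySem.Str.find c m)).filter (fun p => decide (0 ≤ p))) := by
      refine List.mem_filter.mpr ⟨List.mem_map.mpr ⟨mk, hmkL, rfl⟩, ?_⟩
      simp only [PySem.Str.find_eq, ← hcs, decide_eq_true_iff]
      exact hmk0
    cases hE : PySem.List.min?
        (((["###", "<|endoftext|>", "<|end|>", "### Input:", "### Task:"] : List String).map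
          (fun m => PySem.Str.find c m)).filter (fun p => decide (0 ≤ p))) (fun p => p) with
    | none =>
      rw [PySem.List.min?_eq_none_iff] at hE
      rw [hE] at hmkpos
      simp at hmkpos
    | some p =>
      have hpmem := PySem.List.min?_mem hE
      have hpmin := PySem.List.min?_isMin hE
      have hp0 : 0 ≤ p := by
        have := (List.mem_filter.mp hpmem).2
        simpa using this
      have hup : p ≤ PySem.Str.find c mk := hpmin _ hmkpos
      have hupn : p.toNat ≤ n3 := by
        rw [PySem.Str.find_eq, ← hcs] at hup
        omega
      have hlow : n3 ≤ p.toNat := by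
        obtain ⟨hmapmem, _⟩ := List.mem_filter.mp hpmem
        obtain ⟨m, hmL, hmeq⟩ := List.mem_map.mp hmapmem
        rw [← hmeq, PySem.Str.find_eq, ← hcs]
        have hge1 := pvCut_ge_of_pref (m := "### Input:".toList) (by decide) cs
        have hge2 := pvCut_ge_of_pref (m := "### Task:".toList) (by decide) cs
        have hp0' : 0 ≤ PySem.Str.find c m := by
          rw [← hmeq] at hp0; exact hp0
        rw [PySem.Str.find_eq, ← hcs] at hp0'
        fin_cases hmL
        · rw [← pvCut_of_found hp0']; omega
        · rw [← pvCut_of_found hp0']; omega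
        · rw [← pvCut_of_found hp0']; omega
        · rw [← pvCut_of_found hp0']; rw [← hf4] at *; omega
        · rw [← pvCut_of_found hp0']; rw [← hf5] at *; omega
      rw [h5, PySem.Str.toList_slice, PySem.Chars.slice_eq_listSlice,
        PySem.List.slice_to c.toList hp0, ← hcs]
      refine congrArg (fun k => List.take k cs) ?_
      omega
  · -- no stop marker occurs anywhere: both sides leave the string unchanged
    simp only [not_or, not_le] at hany
    obtain ⟨hn1', hn2', hn3'⟩ := hany
    have hn4' : ¬ 0 ≤ PySem.Chars.find cs "### Input:".toList := fun h =>
      absurd (pvFind_sub_nonneg (by decide) h) (by omega)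
    have hn5' : ¬ 0 ≤ PySem.Chars.find cs "### Task:".toList := fun h =>
      absurd (pvFind_sub_nonneg (by decide) h) (by omega)
    have hempty : (((["###", "<|endoftext|>", "<|end|>", "### Input:", "### Task:"] : List String).map
        (fun m => PySem.Str.find c m)).filter (fun p => decide (0 ≤ p))) = [] := by
      rw [List.filter_eq_nil_iff]
      intro a ha
      obtain ⟨m, hmL, hmeq⟩ := List.mem_map.mp ha
      subst hmeq
      simp only [PySem.Str.find_eq, ← hcs, decide_eq_true_iff]
      fin_cases hmL
      · omega
      · omega
      · omega
      · exact hn4'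
      · exact hn5'
    rw [hempty]
    have e1 : n1 = cs.length := pvCut_of_neg (by omega)
    have e2 : q2 = cs.length := pvCut_of_neg (by omega)
    have e3 : q3 = cs.length := pvCut_of_neg (by omega)
    rw [h5]
    simp [PySem.List.min?, ← hcs]
    omega

-- ===== VERDICT (by name: the statement is the Claim_ definition above) =====
theorem extract_cleaned_output_py_spec : Claim_equal_extract_cleaned_output_py := by
  intro generated _hdom
  unfold Spec_extract_cleaned_output_py
  unfold extract_cleaned_output_py extract_cleaned_output_py_alt
  simp only []
  generalize (if PySem.Str.isIn "### Cleaned Output:" generated then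
      PySem.Str.strip ((PySem.List.pyGet?
        ((PySem.Str.split? generated "### Cleaned Output:").getD []) (-1)).getD "")
    else generated) = c
  exact congrArg PySem.Str.strip (pvMain c)
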